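-- pv_equiv track=rewrite | github.com/DanMayhem/project_euler | 061.py | fisc
-- ===== SOURCE A (Python) =====
-- def can_chain_numbers(a, b):
-- 	return str(a)[-2:]==str(b)[:2]
--
-- def fisc(c, ss):
-- 	if len(ss)==1:
-- 		for s in ss[0]:
-- 			if can_chain_numbers(c, s):
-- 				yield [s]
-- 		return
-- 	for i in range(len(ss)):
-- 		#filter the remaing sets to find cyclical candidates
-- 		for j in range(len(ss[i])):
-- 			if can_chain_numbers(c, ss[i][j]):
-- 			#try to find a cyclical set for each number in ss[i], ie ss[i][j]
-- 				ns = []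
-- 				for k in range(len(ss)):
-- 					if i!=k:
-- 						ns.append(ss[k])
-- 				#now we have filtered sets for our subsets
-- 				#recurse
-- 				for l in fisc(ss[i][j],ns):
-- 					yield [ss[i][j]]+l
-- ===== SOURCE B (Python) =====
-- def _selections(xs):
--     # each element paired with the list of the others (order kept)
--     if not xs:
--         return []
--     head, tail = xs[0], xs[1:]
--     return [(head, tail)] + [(d, [head] + rest) for d, rest in _selections(tail)]
--
-- def fisc(c, ss):
--     # breadth-first: grow ALL partial chains level by level; every full chain uses
--     # each set once, so after len(ss) rounds the partials are exactly the answers,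
--     # in lexicographic choice order (= A's depth-first yield order).
--     if not ss:
--         return []
--     partials = [([], str(c)[-2:], ss)]
--     for _ in range(len(ss)):
--         nxt = []
--         for chain, key, rem in partials:
--             for st, rest in _selections(rem):
--                 for s in st:
--                     if str(s)[:2] == key:
--                         nxt.append((chain + [s], str(s)[-2:], rest))
--         partials = nxt
--     return [chain for chain, _, _ in partials]
-- ===== Notes on version B (the rewrite author's own statement) =====
-- stated objective: alternative
-- what changed: B replaces A's depth-first recursive generator by an iterative breadth-first search: it keeps the list of ALL partial chains (chain, tail key, remaining sets) and extends every one of them by one element per round for len(ss) rounds; since every full chain uses each set exactly once, the final level is exactly the answer list, in A's lexicographic choice order.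
import Mathlib
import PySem

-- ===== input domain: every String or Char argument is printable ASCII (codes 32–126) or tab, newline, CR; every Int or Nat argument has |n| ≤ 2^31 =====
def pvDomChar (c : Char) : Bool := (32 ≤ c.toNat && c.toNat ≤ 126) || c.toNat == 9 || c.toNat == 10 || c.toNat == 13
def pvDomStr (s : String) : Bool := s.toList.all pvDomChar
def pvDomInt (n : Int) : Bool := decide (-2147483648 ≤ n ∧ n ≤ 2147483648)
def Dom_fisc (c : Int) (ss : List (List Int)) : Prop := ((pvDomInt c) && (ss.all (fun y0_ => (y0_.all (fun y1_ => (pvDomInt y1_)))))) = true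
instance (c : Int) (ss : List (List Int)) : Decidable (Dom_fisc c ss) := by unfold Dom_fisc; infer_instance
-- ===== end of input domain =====

-- B replaces A's depth-first recursive generator by an iterative breadth-first search
-- that grows all partial chains level by level (an alternative of similar cost);
-- equivalence is about the RETURN values (A is a generator, consumed as a list).

-- ===== PORT A =====
-- str(b)[:2]  (first two characters of the decimal string)
def pvPre2 (b : Int) : List Char := PySem.List.slice (PySem.Int.toChars b) none (some 2)
-- str(a)[-2:]  (last two characters of the decimal string)
def pvSfx2 (a : Int) : List Char := PySem.List.slice (PySem.Int.toChars a) (some (-2)) none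
-- can_chain_numbers(a, b) = str(a)[-2:] == str(b)[:2]
def canChainNumbers (a b : Int) : Bool := pvSfx2 a == pvPre2 b

-- fisc as a generator, collected into a list; fuel = len(ss) makes the recursion
-- structural (each recursive call gets a list exactly one element shorter)
def fiscAux : Nat → Int → List (List Int) → List (List Int)
  | fuel, c, ss =>
    if ss.length == 1 then
      (PySem.List.pyGetD ss 0 []).foldl
        (fun acc s => if canChainNumbers c s then acc ++ [[s]] else acc) []
    else
      match fuel with
      | 0 => []  -- only reached for ss = [], where the Python loop body never runs
      | fuel + 1 =>
        (PySem.List.pyRange 0 (PySem.List.len ss) 1).foldl (fun acc i =>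
          (PySem.List.pyRange 0 (PySem.List.len (PySem.List.pyGetD ss i [])) 1).foldl
            (fun acc j =>
              if canChainNumbers c (PySem.List.pyGetD (PySem.List.pyGetD ss i []) j (0 : Int)) then
                (fiscAux fuel (PySem.List.pyGetD (PySem.List.pyGetD ss i []) j (0 : Int))
                    ((PySem.List.pyRange 0 (PySem.List.len ss) 1).foldl
                      (fun ns k => if i ≠ k then ns ++ [PySem.List.pyGetD ss k []] else ns) [])).foldl
                  (fun acc l => acc ++ [PySem.List.pyGetD (PySem.List.pyGetD ss i []) j (0 : Int) :: l]) acc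
              else acc) acc) []

def fisc (c : Int) (ss : List (List Int)) : List (List Int) := fiscAux ss.length c ss

-- ===== PORT B =====
-- _selections(xs): each element paired with the list of the others, structurally
def pvSelections {α : Type} : List α → List (α × List α)
  | [] => []
  | d :: tl => (d, tl) :: (pvSelections tl).map (fun p => (p.1, d :: p.2))

-- one round of the loop body: extend every partial (chain, key, rem) in order
def pvStep (partials : List (List Int × List Char × List (List Int))) :
    List (List Int × List Char × List (List Int)) :=
  partials.foldl (fun nxt p =>
    (pvSelections p.2.2).foldl (fun nxt q =>
      q.1.foldl (fun nxt s =>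
        if pvPre2 s == p.2.1 then nxt ++ [(p.1 ++ [s], pvSfx2 s, q.2)] else nxt) nxt) nxt) []

def fisc_alt (c : Int) (ss : List (List Int)) : List (List Int) :=
  if ss = [] then []
  else ((List.range ss.length).foldl (fun ps _ => pvStep ps) [([], pvSfx2 c, ss)]).map (·.1)

-- ===== PRECONDITION & SPEC =====
def Spec_fisc (c : Int) (ss : List (List Int)) (out : List (List Int)) : Prop := out = fisc_alt c ss
instance (c : Int) (ss : List (List Int)) (out : List (List Int)) : Decidable (Spec_fisc c ss out) := by unfold Spec_fisc; infer_instance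

-- ===== CLAIM =====
def Claim_equal_fisc : Prop := ∀ (c : Int) (ss : List (List Int)), Dom_fisc c ss → Spec_fisc c ss (fisc c ss)

-- ===== LEMMAS AND PROOFS =====

theorem map_getD_range {α : Type} (xs : List α) (d : α) :
    (List.range xs.length).map (fun j => xs.getD j d) = xs := by
  apply List.ext_getElem
  · simp
  · intro i h1 h2
    simp [List.getD_eq_getElem?_getD, List.getElem?_eq_getElem h2]

theorem filter_range_map_getD {α : Type} (xs : List α) (d : α) (k : Nat) :
    ((List.range xs.length).filter (fun j => decide ¬(k = j))).map (fun j => xs.getD j d)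
      = xs.eraseIdx k := by
  induction xs generalizing k with
  | nil => simp
  | cons x tl ih =>
    rw [List.length_cons, List.range_succ_eq_map, List.filter_cons]
    cases k with
    | zero =>
      have h0 : (decide ¬((0:Nat) = 0)) = false := by simp
      rw [h0]
      simp only [Bool.false_eq_true, if_false, List.filter_map]
      have : (fun j => decide ¬((0:Nat) = j)) ∘ Nat.succ = fun _ => true := by
        funext j; simp [Function.comp]
      rw [this, List.filter_true, List.map_map, List.eraseIdx_cons_zero]
      have : (fun j => (x :: tl).getD j d) ∘ Nat.succ = fun j => tl.getD j d := by
        funext j; simp [Function.comp]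
      rw [this, map_getD_range]
    | succ m =>
      have h0 : (decide ¬(m + 1 = 0)) = true := by simp
      rw [h0]
      simp only [if_true, List.filter_map]
      have hc : (fun j => decide ¬(m + 1 = j)) ∘ Nat.succ = fun j => decide ¬(m = j) := by
        funext j; by_cases h : m = j <;> simp [Function.comp, h]
      rw [hc, List.map_cons, List.map_map, List.eraseIdx_cons_succ]
      have : (fun j => (x :: tl).getD j d) ∘ Nat.succ = fun j => tl.getD j d := by
        funext j; simp [Function.comp]
      rw [this, ih m]
      simp

theorem ns_fold_eq (ss : List (List Int)) (k : Nat) :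
    ((List.range ss.length).map (fun j => ((j : Nat) : Int))).foldl
      (fun ns j => if ((k : Nat) : Int) ≠ j then ns ++ [PySem.List.pyGetD ss j []] else ns) []
      = ss.eraseIdx k := by
  rw [List.foldl_map]
  have : (fun (ns : List (List Int)) (j : Nat) =>
      if ((k : Nat) : Int) ≠ (j : Int) then ns ++ [PySem.List.pyGetD ss (j : Int) []] else ns)
      = fun ns j => if ¬(k = j) then ns ++ [ss.getD j []] else ns := by
    funext ns j
    simp [PySem.List.pyGetD_natCast]
  rw [this]
  rw [PySem.List.foldl_append_ite (fun j => ¬(k = j)) (fun j => ss.getD j [])]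
  rw [List.nil_append, filter_range_map_getD]

theorem fiscAux_succ (f : Nat) (c : Int) (ss : List (List Int)) (h : ss.length ≠ 1) :
    fiscAux (f + 1) c ss = (List.range ss.length).flatMap (fun k =>
      ((ss.getD k []).filter (fun s => canChainNumbers c s)).flatMap
        (fun s => (fiscAux f s (ss.eraseIdx k)).map (fun l => s :: l))) := by
  conv_lhs => rw [fiscAux]
  rw [if_neg (by simpa using h)]
  simp only [PySem.List.foldl_append_singleton_eq_map]
  rw [show PySem.List.pyRange 0 (PySem.List.len ss) 1
      = (List.range ss.length).map (fun k => ((k : Nat) : Int)) by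
    rw [PySem.List.len_eq, PySem.List.pyRange_one]; simp]
  rw [List.foldl_map]
  rw [PySem.List.foldl_congr_mem (List.range ss.length) _
    (fun acc k => acc ++ ((ss.getD k []).filter (fun s => canChainNumbers c s)).flatMap
        (fun s => (fiscAux f s (ss.eraseIdx k)).map (fun l => s :: l))) []
    ?_]
  · rw [PySem.List.foldl_append_eq_flatMap, List.nil_append]
  · intro acc k hk
    rw [ns_fold_eq ss k]
    rw [PySem.List.pyGetD_natCast ss k]
    have h1 := PySem.List.foldl_pyRange_zero_pyGetD (ss.getD k []) (0 : Int)
      (fun acc s => if canChainNumbers c s then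
        acc ++ (fiscAux f s (ss.eraseIdx k)).map (fun l => s :: l) else acc) acc
    simp only at h1
    rw [h1]
    have h2 := PySem.List.foldl_if_eq_foldl_filter (fun s => canChainNumbers c s)
      (fun acc s => acc ++ (fiscAux f s (ss.eraseIdx k)).map (fun l => s :: l))
      (ss.getD k []) acc
    simp only at h2
    rw [h2, PySem.List.foldl_append_eq_flatMap]

theorem canChain_comm (c s : Int) : canChainNumbers c s = (pvPre2 s == pvSfx2 c) := by
  unfold canChainNumbers
  by_cases h : pvSfx2 c = pvPre2 s
  · simp [h]
  · simp [h, Ne.symm h]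

theorem pvSelections_eq_range {α : Type} (xs : List α) (d : α) :
    pvSelections xs = (List.range xs.length).map (fun k => (xs.getD k d, xs.eraseIdx k)) := by
  induction xs with
  | nil => rfl
  | cons x tl ih =>
    rw [pvSelections, List.length_cons, List.range_succ_eq_map, List.map_cons, List.map_map, ih]
    simp [List.map_map, Function.comp_def]

theorem pvSelections_rest_length {α : Type} (xs : List α) :
    ∀ p ∈ pvSelections xs, p.2.length + 1 = xs.length := by
  induction xs with
  | nil => intro p hp; cases hp
  | cons x tl ih =>
    intro p hp
    rw [pvSelections] at hp
    rcases List.mem_cons.mp hp with rfl | hp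
    · simp
    · rcases List.mem_map.mp hp with ⟨q, hq, rfl⟩
      have := ih q hq
      simp only [List.length_cons]
      omega

-- proof-only: the keyed depth-first search (what both programs compute at each level)
def chainsG : Nat → List Char → List (List Int) → List (List Int)
  | 0, _, _ => [[]]
  | f + 1, key, rem =>
    (pvSelections rem).flatMap (fun q =>
      (q.1.filter (fun s => pvPre2 s == key)).flatMap
        (fun s => (chainsG f (pvSfx2 s) q.2).map (fun t => s :: t)))

theorem fiscAux_eq_chainsG : ∀ (n : Nat) (c : Int) (ss : List (List Int)),
    ss.length = n → 1 ≤ n → fiscAux n c ss = chainsG n (pvSfx2 c) ss := by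
  intro n
  induction n with
  | zero => intro c ss _ h; omega
  | succ f ih =>
    intro c ss hlen _
    by_cases h1 : ss.length = 1
    · obtain ⟨st, rfl⟩ := List.length_eq_one_iff.mp h1
      have hf : f = 0 := by simpa using hlen.symm.trans h1
      subst hf
      rw [fiscAux]
      rw [if_pos (by simp)]
      rw [show PySem.List.pyGetD [st] 0 [] = st from PySem.List.pyGetD_zero_cons st [] []]
      have := PySem.List.foldl_append_if (fun s => canChainNumbers c s)
        (fun s => [s]) st ([] : List (List Int))
      simp only at this
      rw [this, List.nil_append]
      rw [chainsG]
      simp only [pvSelections, List.map_nil, List.flatMap_cons, List.flatMap_nil,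
        List.append_nil, chainsG, List.map_cons, List.map_nil]
      rw [show (st.filter (fun s => canChainNumbers c s))
          = st.filter (fun s => pvPre2 s == pvSfx2 c) from
        List.filter_congr (fun s _ => by rw [canChain_comm])]
      induction st.filter (fun s => pvPre2 s == pvSfx2 c) with
      | nil => rfl
      | cons a tl ih2 => simp [ih2]
    · have hf1 : 1 ≤ f := by omega
      rw [fiscAux_succ f c ss h1, chainsG]
      rw [pvSelections_eq_range ss [], List.flatMap_map]
      rw [List.flatMap_def, List.flatMap_def]
      congr 1
      apply List.map_congr_left
      intro k hk
      have hklt : k < ss.length := List.mem_range.mp hk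
      have hrest : (ss.eraseIdx k).length = f := by
        rw [List.length_eraseIdx_of_lt hklt, hlen]
        omega
      simp only
      rw [show ((ss.getD k []).filter (fun s => canChainNumbers c s))
          = (ss.getD k []).filter (fun s => pvPre2 s == pvSfx2 c) from
        List.filter_congr (fun s _ => by rw [canChain_comm])]
      congr 1
      funext s
      rw [ih s (ss.eraseIdx k) hrest hf1]

theorem pvStep_flatMap (ps : List (List Int × List Char × List (List Int))) :
    pvStep ps = ps.flatMap (fun p =>
      (pvSelections p.2.2).flatMap (fun q =>
        (q.1.filter (fun s => pvPre2 s == p.2.1)).map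
          (fun s => (p.1 ++ [s], pvSfx2 s, q.2)))) := by
  unfold pvStep
  rw [PySem.List.foldl_congr_mem ps _
    (fun nxt p => nxt ++ (pvSelections p.2.2).flatMap (fun q =>
        (q.1.filter (fun s => pvPre2 s == p.2.1)).map
          (fun s => (p.1 ++ [s], pvSfx2 s, q.2)))) [] ?_]
  · rw [PySem.List.foldl_append_eq_flatMap, List.nil_append]
  · intro nxt p _
    rw [PySem.List.foldl_congr_mem (pvSelections p.2.2) _
      (fun nxt q => nxt ++ (q.1.filter (fun s => pvPre2 s == p.2.1)).map
          (fun s => (p.1 ++ [s], pvSfx2 s, q.2))) nxt ?_]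
    · rw [PySem.List.foldl_append_eq_flatMap]
    · intro nxt q _
      have := PySem.List.foldl_append_if (fun s => pvPre2 s == p.2.1)
        (fun s => (p.1 ++ [s], pvSfx2 s, q.2)) q.1 nxt
      simpa using this

theorem bfs_levels : ∀ (m : Nat) (ps : List (List Int × List Char × List (List Int))),
    (∀ p ∈ ps, p.2.2.length = m) →
    ((List.range m).foldl (fun a _ => pvStep a) ps).map (·.1)
      = ps.flatMap (fun p => (chainsG m p.2.1 p.2.2).map (fun t => p.1 ++ t)) := by
  intro m
  induction m with
  | zero =>
    intro ps _
    have h0 : ∀ (l : List (List Int × List Char × List (List Int))),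
        l.flatMap (fun p => [p.1]) = l.map (·.1) := by
      intro l; induction l with
      | nil => rfl
      | cons a tl ih2 => simp_all
    simp only [List.range_zero, List.foldl_nil, chainsG, List.map_cons, List.map_nil,
      List.append_nil]
    exact (h0 ps).symm
  | succ f ih =>
    intro ps hlen
    rw [List.range_succ_eq_map, List.foldl_cons, List.foldl_map]
    rw [ih (pvStep ps) ?_]
    · rw [pvStep_flatMap]
      simp only [chainsG, List.flatMap_assoc, List.flatMap_map, List.map_flatMap,
        List.map_map, Function.comp_def, List.append_assoc, List.singleton_append]
    · intro p hp
      rw [pvStep_flatMap] at hp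
      rcases List.mem_flatMap.mp hp with ⟨r, hr, hp2⟩
      rcases List.mem_flatMap.mp hp2 with ⟨q, hq, hp3⟩
      rcases List.mem_map.mp hp3 with ⟨s, _, rfl⟩
      have h1 := pvSelections_rest_length r.2.2 q hq
      have h2 := hlen r hr
      simp only
      omega

-- ===== VERDICT =====
theorem fisc_spec : Claim_equal_fisc := by
  unfold Claim_equal_fisc Spec_fisc
  intro c ss _
  unfold fisc fisc_alt
  cases ss with
  | nil => rfl
  | cons s tl =>
    rw [if_neg (by simp)]
    rw [bfs_levels (s :: tl).length [([], pvSfx2 c, s :: tl)] (by intro p hp; simp at hp; simp [hp])]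
    simp only [List.flatMap_cons, List.flatMap_nil, List.append_nil, List.nil_append]
    rw [fiscAux_eq_chainsG (s :: tl).length c (s :: tl) rfl (by simp)]
    simp [List.map_id']
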